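-- pv_equiv track=rewrite | github.com/dbenlopers/SANDBOX | misc/data_quality_is/TasksManagement/data_quality/processing/ctlog.py | _compute_equivalent_integration_mode
-- ===== SOURCE A (Python) =====
-- def _compute_equivalent_integration_mode(messagepattern_by_im_id):
--     """
--     From the dict (key, im id: value, set of message patter) & compute/search integration mode that are equivalent
--     :param messagepattern_by_im_id:
--     :return:
--     """
--     messagepattern_by_im_id_clear = messagepattern_by_im_id
--     # remove optional content
--     for key, value in messagepattern_by_im_id_clear.items():
--         messagepattern_by_im_id_clear[key] = {x for x in value if not "±" in x}
--
--     im_equ = {key: [] for key in messagepattern_by_im_id_clear.keys()}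
--
--     # Construct a dict where you get equivalent integration mode
--     for im in messagepattern_by_im_id_clear.keys():
--         for key, value in messagepattern_by_im_id_clear.items():
--             if messagepattern_by_im_id_clear[im] == value:
--                 im_equ[im].append(key)
--     return im_equ
-- ===== SOURCE B (Python) =====
-- def _compute_equivalent_integration_mode(messagepattern_by_im_id):
--     # Group ids by equal cleaned message-pattern set via a dict keyed by the
--     # sorted cleaned patterns (one pass) instead of comparing every pair of sets.
--     # NOTE: unlike A, this does not mutate the argument dict in place.
--     cleaned = {key: {x for x in value if "±" not in x}
--                for key, value in messagepattern_by_im_id.items()}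
--     groups = {}
--     for key, value in cleaned.items():
--         groups.setdefault(tuple(sorted(value)), []).append(key)
--     return {key: groups[tuple(sorted(value))] for key, value in cleaned.items()}
-- ===== Notes on version B (the rewrite author's own statement) =====
-- stated objective: faster
-- what changed: Replaces A's all-pairs set comparison (for every id, scan all ids and compare sets) by one grouping pass over a dict keyed by the sorted cleaned pattern set, then a lookup per id.
import Mathlib
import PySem

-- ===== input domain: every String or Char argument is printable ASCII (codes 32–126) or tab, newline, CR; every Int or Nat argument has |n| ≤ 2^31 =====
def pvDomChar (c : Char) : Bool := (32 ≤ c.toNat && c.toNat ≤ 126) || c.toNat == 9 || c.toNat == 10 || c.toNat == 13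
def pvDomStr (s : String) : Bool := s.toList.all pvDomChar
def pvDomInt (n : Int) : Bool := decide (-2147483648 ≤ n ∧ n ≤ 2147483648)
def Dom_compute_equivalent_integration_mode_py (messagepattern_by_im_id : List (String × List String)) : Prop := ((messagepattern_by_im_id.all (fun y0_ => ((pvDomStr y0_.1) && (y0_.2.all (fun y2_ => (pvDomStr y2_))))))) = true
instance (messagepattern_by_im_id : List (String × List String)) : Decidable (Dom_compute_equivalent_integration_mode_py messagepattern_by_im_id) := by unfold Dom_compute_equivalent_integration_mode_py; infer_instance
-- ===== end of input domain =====

-- B groups ids by the sorted cleaned pattern set in one pass instead of comparing every pair of sets (A also mutates its argument dict in place; B does not — the equivalence proved is about the return value).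
-- ===== PORT A =====
def compute_equivalent_integration_mode_py (messagepattern_by_im_id : List (String × List String)) : List (String × List String) :=
  let d0 := PySem.Dict.ofList messagepattern_by_im_id
  -- for key, value in d.items(): d[key] = {x for x in value if not "±" in x}
  let dc := d0.items.foldl (fun dd kv =>
      dd.insert kv.1 (PySem.Set.ofList (kv.2.filter (fun x => !(PySem.Str.isIn "±" x))))) d0
  -- im_equ = {key: [] for key in d.keys()}
  let im_equ0 := dc.keys.foldl (fun e k => e.insert k ([] : List String)) PySem.Dict.empty
  -- nested loop appending equivalent keys
  let im_equ := dc.keys.foldl (fun e im =>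
      dc.items.foldl (fun e2 kv =>
        if PySem.Set.equal (dc.getD im []) kv.2 then e2.modify im [] (· ++ [kv.1]) else e2) e) im_equ0
  im_equ.items

-- ===== PORT B =====
def compute_equivalent_integration_mode_py_alt (messagepattern_by_im_id : List (String × List String)) : List (String × List String) :=
  let cleaned := (PySem.Dict.ofList messagepattern_by_im_id).items.map
      (fun kv => (kv.1, (PySem.Set.ofList (kv.2.filter (fun x => !(PySem.Str.isIn "±" x))) : List String)))
  let groups := cleaned.foldl (fun (g : PySem.Dict (List String) (List String)) kv =>
      g.modify (PySem.List.sorted kv.2 (fun x => x) false) [] (· ++ [kv.1])) PySem.Dict.empty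
  cleaned.map (fun kv => (kv.1, groups.getD (PySem.List.sorted kv.2 (fun x => x) false) []))

-- ===== PRECONDITION & SPEC =====
def Spec_compute_equivalent_integration_mode_py (messagepattern_by_im_id : List (String × List String)) (out : List (String × List String)) : Prop := out = compute_equivalent_integration_mode_py_alt messagepattern_by_im_id
instance (messagepattern_by_im_id : List (String × List String)) (out : List (String × List String)) : Decidable (Spec_compute_equivalent_integration_mode_py messagepattern_by_im_id out) := by unfold Spec_compute_equivalent_integration_mode_py; infer_instance

-- ===== CLAIM (what is proved, stated in full; the proofs are below) =====
def Claim_equal_compute_equivalent_integration_mode_py : Prop := ∀ (messagepattern_by_im_id : List (String × List String)), Dom_compute_equivalent_integration_mode_py messagepattern_by_im_id → Spec_compute_equivalent_integration_mode_py messagepattern_by_im_id (compute_equivalent_integration_mode_py messagepattern_by_im_id)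

-- ===== LEMMAS AND PROOFS =====

-- the cleaned value a pattern list is mapped to (both programs compute this term)
def pvCleanKV (kv : String × List String) : String × List String :=
  (kv.1, (PySem.Set.ofList (kv.2.filter (fun x => !(PySem.Str.isIn "±" x))) : List String))

-- the cleaned item list both programs group over
def pvCi (m : List (String × List String)) : List (String × List String) :=
  (PySem.Dict.ofList m).items.map pvCleanKV

theorem pv_set_update_of_mem (s : PySem.Set String) (l : List String)
    (h : ∀ x ∈ l, x ∈ s) : PySem.Set.update s l = s := by
  induction l generalizing s with
  | nil => rfl
  | cons x t ih =>
    simp only [PySem.Set.update, List.foldl_cons] at *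
    rw [show PySem.Set.add s x = s from by
      simp [PySem.Set.add, PySem.Set.contains, h x (by simp)]]
    exact ih s (fun y hy => h y (by simp [hy]))

-- A's first loop: overwriting each key of the dict with its cleaned value, in place
theorem pv_fold_insert_items (clean : String × List String → String × List String)
    (hk : ∀ kv, (clean kv).1 = kv.1) :
    ∀ (r q : List (String × List String)),
      (((q ++ r).map Prod.fst).Nodup) →
      ((r.foldl (fun dd kv => dd.insert kv.1 (clean kv).2) (PySem.Dict.mk (q ++ r))).items)
        = q ++ r.map clean := by
  intro r
  induction r with
  | nil => intro q h; simp
  | cons kv r' ih =>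
    intro q h
    have hc : (PySem.Dict.mk (q ++ kv :: r')).contains kv.1 = true := by
      simp [PySem.Dict.contains_mk]
    rw [List.foldl_cons]
    have hq : ∀ p ∈ q, p.1 ≠ kv.1 := by
      intro p hp heq
      rw [List.map_append, List.nodup_append] at h
      exact h.2.2 _ (List.mem_map_of_mem hp) kv.1 (by simp) heq
    have hr : ∀ p ∈ r', p.1 ≠ kv.1 := by
      rw [List.map_append, List.nodup_append] at h
      have h2 := h.2.1
      simp only [List.map_cons, List.nodup_cons] at h2
      intro p hp heq
      exact h2.1 (heq ▸ List.mem_map_of_mem hp)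
    have hitems : ((PySem.Dict.mk (q ++ kv :: r')).insert kv.1 (clean kv).2).items
        = q ++ clean kv :: r' := by
      rw [PySem.Dict.items_insert_of_contains _ _ hc]
      show List.map _ (q ++ kv :: r') = _
      rw [List.map_append, List.map_cons]
      congr 1
      · conv_rhs => rw [← List.map_id q]
        exact List.map_congr_left (fun p hp => by simp [hq p hp])
      · simp only [beq_self_eq_true, if_pos]
        congr 1
        · exact (Prod.ext (hk kv).symm rfl)
        · conv_rhs => rw [← List.map_id r']
          exact List.map_congr_left (fun p hp => by simp [hr p hp])
    have heq2 : (PySem.Dict.mk (q ++ kv :: r')).insert kv.1 (clean kv).2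
        = PySem.Dict.mk (q ++ clean kv :: r') := congrArg PySem.Dict.mk hitems
    rw [heq2]
    have hnd' : (((q ++ [clean kv]) ++ r').map Prod.fst).Nodup := by
      have : ((q ++ [clean kv]) ++ r').map Prod.fst = (q ++ kv :: r').map Prod.fst := by
        simp [hk kv]
      rw [this]; exact h
    have := ih (q ++ [clean kv]) hnd'
    simpa using this

-- one pass of A's inner loop changes only key im, appending the matching ids there
theorem pv_inner_getD (ci : List (String × List String)) (pb : String × List String → Bool)
    (im k : String) (e : PySem.Dict String (List String)) :
    (ci.foldl (fun e2 kv => if pb kv then e2.modify im [] (· ++ [kv.1]) else e2) e).getD k []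
      = if k = im then e.getD k [] ++ (ci.filter pb).map Prod.fst else e.getD k [] := by
  rw [PySem.List.foldl_if_eq_foldl_filter]
  rw [show (ci.filter pb).foldl (fun e2 kv => e2.modify im [] (· ++ [kv.1])) e
      = (((ci.filter pb).map (fun kv => (im, kv.1))).foldl
          (fun d p => d.modify p.1 [] (· ++ [p.2])) e) from (List.foldl_map (f := fun kv : String × List String => (im, kv.1)) (g := fun (d : PySem.Dict String (List String)) (p : String × String) => d.modify p.1 [] (· ++ [p.2]))).symm]
  rw [PySem.Dict.getD_foldl_modify_append]
  by_cases hk : k = im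
  · subst hk
    simp [List.filter_map, Function.comp_def]
  · have : (((ci.filter pb).map (fun kv => (k, kv.1) : _ → String × String)).filter (fun p => p.1 == k)) = _ := rfl
    simp [List.filter_map, Function.comp_def, Ne.symm hk, hk]

theorem pv_inner_keys (ci : List (String × List String)) (pb : String × List String → Bool)
    (im : String) (e : PySem.Dict String (List String)) (him : im ∈ e.keys) :
    (ci.foldl (fun e2 kv => if pb kv then e2.modify im [] (· ++ [kv.1]) else e2) e).keys
      = e.keys := by
  rw [PySem.List.foldl_if_eq_foldl_filter]
  rw [PySem.Dict.keys_foldl_modify_key (ci.filter pb) (fun _ => im) [] (fun _ kv v => v ++ [kv.1]) e]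
  exact pv_set_update_of_mem _ _ (by intro x hx; simp at hx; simpa [hx.2.symm] using him)

-- A's outer loop: generic fold lemmas for a step that touches only its own key
theorem pv_outer_untouched (step : PySem.Dict String (List String) → String → PySem.Dict String (List String))
    (hne : ∀ e im k, k ≠ im → (step e im).getD k [] = e.getD k []) :
    ∀ (l : List String) (e : PySem.Dict String (List String)) (k : String), k ∉ l →
      (l.foldl step e).getD k [] = e.getD k [] := by
  intro l
  induction l with
  | nil => intro e k _; rfl
  | cons im t ih =>
    intro e k hk
    rw [List.foldl_cons, ih _ k (fun h => hk (List.mem_cons_of_mem _ h))]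
    exact hne e im k (fun h => hk (h ▸ List.mem_cons_self))

theorem pv_outer_keys (step : PySem.Dict String (List String) → String → PySem.Dict String (List String))
    (hkeys : ∀ e im, im ∈ e.keys → (step e im).keys = e.keys) :
    ∀ (l : List String) (e : PySem.Dict String (List String)), (∀ im ∈ l, im ∈ e.keys) →
      (l.foldl step e).keys = e.keys := by
  intro l
  induction l with
  | nil => intro e _; rfl
  | cons im t ih =>
    intro e h
    rw [List.foldl_cons]
    have hk := hkeys e im (h im (by simp))
    rw [ih _ (fun j hj => hk ▸ h j (by simp [hj])), hk]

theorem pv_outer_getD (step : PySem.Dict String (List String) → String → PySem.Dict String (List String))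
    (grp : String → List String)
    (hself : ∀ e im, (step e im).getD im [] = e.getD im [] ++ grp im)
    (hne : ∀ e im k, k ≠ im → (step e im).getD k [] = e.getD k []) :
    ∀ (l : List String) (e : PySem.Dict String (List String)), l.Nodup → ∀ k ∈ l,
      (l.foldl step e).getD k [] = e.getD k [] ++ grp k := by
  intro l
  induction l with
  | nil => intro e _ k hk; cases hk
  | cons im t ih =>
    intro e hnd k hk
    rw [List.foldl_cons]
    rcases List.mem_cons.mp hk with h | h
    · subst h
      rw [pv_outer_untouched step hne t _ k (List.nodup_cons.mp hnd).1]
      exact hself e k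
    · rw [ih _ (List.nodup_cons.mp hnd).2 k h]
      have hkim : k ≠ im := fun he => (List.nodup_cons.mp hnd).1 (he ▸ h)
      rw [hne e im k hkim]

-- equality of cleaned pattern sets = equality of their sorted lists
theorem pv_equal_iff_canon (u w : List String) (hu : u.Nodup) (hw : w.Nodup) :
    PySem.Set.equal u w
      = (PySem.List.sorted w (fun x => x) false == PySem.List.sorted u (fun x => x) false) := by
  rw [Bool.eq_iff_iff, beq_iff_eq, PySem.List.sorted_id_eq_sorted_id_iff_perm]
  rw [show (PySem.Set.equal u w = true) ↔ ((∀ x ∈ u, x ∈ w) ∧ ∀ x ∈ w, x ∈ u) from by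
    simp [PySem.Set.equal, PySem.Set.issubset]]
  rw [List.perm_ext_iff_of_nodup hw hu]
  constructor
  · rintro ⟨h1, h2⟩ a; exact ⟨h2 a, h1 a⟩
  · intro h; exact ⟨fun a => (h a).2, fun a => (h a).1⟩

-- A's output in normal form
theorem pv_a_eq (m : List (String × List String)) :
    compute_equivalent_integration_mode_py m
      = (pvCi m).map (fun kv =>
          (kv.1, ((pvCi m).filter (fun kv' => PySem.Set.equal kv.2 kv'.2)).map Prod.fst)) := by
  have hnd : ((PySem.Dict.ofList m).items.map Prod.fst).Nodup := by
    have := PySem.Dict.nodup_keys_ofList (κ := String) (ν := List String) m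
    simpa [PySem.Dict.keys] using this
  have hks : (pvCi m).map Prod.fst = (PySem.Dict.ofList m).items.map Prod.fst := by
    simp [pvCi, List.map_map, Function.comp_def, pvCleanKV]
  have hndks : ((pvCi m).map Prod.fst).Nodup := by rw [hks]; exact hnd
  -- step 1: the cleaning loop rewrites the dict to (mk (pvCi m))
  have h_dc : ((PySem.Dict.ofList m).items.foldl
      (fun dd kv => dd.insert kv.1 (PySem.Set.ofList (kv.2.filter (fun x => !(PySem.Str.isIn "±" x)))))
      (PySem.Dict.ofList m)) = PySem.Dict.mk (pvCi m) := by
    have h := pv_fold_insert_items pvCleanKV (fun kv => rfl) (PySem.Dict.ofList m).items [] (by simpa using hnd)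
    have heq : ((PySem.Dict.ofList m).items.foldl
        (fun dd kv => dd.insert kv.1 (PySem.Set.ofList (kv.2.filter (fun x => !(PySem.Str.isIn "±" x)))))
        (PySem.Dict.ofList m))
        = ((PySem.Dict.ofList m).items.foldl
        (fun dd kv => dd.insert kv.1 (pvCleanKV kv).2)
        (PySem.Dict.mk ([] ++ (PySem.Dict.ofList m).items))) := rfl
    rw [heq]
    exact congrArg PySem.Dict.mk h
  unfold compute_equivalent_integration_mode_py
  dsimp only
  rw [h_dc]
  simp only [PySem.Dict.keys_mk]
  have hempty : ∀ a ∈ (pvCi m).map Prod.fst, (PySem.Dict.empty : PySem.Dict String (List String)).contains a = false := by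
    intro a _; simp [pysem]
  have h0 : (((pvCi m).map Prod.fst).foldl (fun e k => e.insert k ([] : List String)) PySem.Dict.empty)
      = PySem.Dict.mk (((pvCi m).map Prod.fst).map (fun k => (k, ([] : List String)))) := by
    have h := PySem.Dict.items_foldl_insert_fresh ((pvCi m).map Prod.fst) (fun a => a)
      (fun _ => ([] : List String)) PySem.Dict.empty hempty (by simpa using hndks)
    exact congrArg PySem.Dict.mk h
  rw [h0]
  have hnd2 : (List.map (fun x : String × List String => x.1) (pvCi m)).Nodup := hndks
  have hself : ∀ (e : PySem.Dict String (List String)) im,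
      ((fun e im => (pvCi m).foldl (fun e2 kv =>
          if PySem.Set.equal ((PySem.Dict.mk (pvCi m)).getD im []) kv.2 = true
          then e2.modify im [] (fun x => x ++ [kv.1]) else e2) e) e im).getD im []
        = e.getD im [] ++ ((pvCi m).filter (fun kv =>
            PySem.Set.equal ((PySem.Dict.mk (pvCi m)).getD im []) kv.2)).map Prod.fst := by
    intro e im
    simpa using pv_inner_getD (pvCi m)
      (fun kv => PySem.Set.equal ((PySem.Dict.mk (pvCi m)).getD im []) kv.2) im im e
  have hne : ∀ (e : PySem.Dict String (List String)) im k, k ≠ im →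
      ((fun e im => (pvCi m).foldl (fun e2 kv =>
          if PySem.Set.equal ((PySem.Dict.mk (pvCi m)).getD im []) kv.2 = true
          then e2.modify im [] (fun x => x ++ [kv.1]) else e2) e) e im).getD k []
        = e.getD k [] := by
    intro e im k hk
    simpa [hk] using pv_inner_getD (pvCi m)
      (fun kv => PySem.Set.equal ((PySem.Dict.mk (pvCi m)).getD im []) kv.2) im k e
  have hkeys : ∀ (e : PySem.Dict String (List String)) im, im ∈ e.keys →
      ((fun e im => (pvCi m).foldl (fun e2 kv =>
          if PySem.Set.equal ((PySem.Dict.mk (pvCi m)).getD im []) kv.2 = true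
          then e2.modify im [] (fun x => x ++ [kv.1]) else e2) e) e im).keys = e.keys := by
    intro e im h
    exact pv_inner_keys (pvCi m) _ im e h
  have he0keys : (PySem.Dict.mk ((((pvCi m).map Prod.fst)).map (fun k => (k, ([] : List String))))).keys
      = (pvCi m).map Prod.fst := by
    simp [PySem.Dict.keys, List.map_map, Function.comp_def]
  have hfinkeys := pv_outer_keys _ hkeys (List.map (fun x : String × List String => x.1) (pvCi m))
    (PySem.Dict.mk ((((pvCi m).map Prod.fst)).map (fun k => (k, ([] : List String)))))
    (by intro im him; rw [he0keys]; exact him)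
  have hfingetD := pv_outer_getD _ _ hself hne
    (List.map (fun x : String × List String => x.1) (pvCi m))
    (PySem.Dict.mk ((((pvCi m).map Prod.fst)).map (fun k => (k, ([] : List String))))) hnd2
  rw [PySem.Dict.items_eq_map_keys _ ?hndfin []]
  case hndfin => rw [hfinkeys, he0keys]; exact hndks
  rw [hfinkeys, he0keys]
  rw [List.map_map]
  refine List.map_congr_left (fun kv hkv => ?_)
  have hgd : (PySem.Dict.mk (pvCi m)).getD kv.1 [] = kv.2 :=
    PySem.Dict.getD_of_mem_items _ (by simpa using hkv)
      (by simpa [PySem.Dict.keys] using hndks) []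
  have hmem : kv.1 ∈ List.map (fun x : String × List String => x.1) (pvCi m) :=
    List.mem_map_of_mem hkv
  have h1 := hfingetD kv.1 hmem
  have hmm : (kv.1, ([] : List String)) ∈ ((pvCi m).map Prod.fst).map (fun k => (k, ([] : List String))) :=
    List.mem_map_of_mem (List.mem_map_of_mem hkv)
  have he0 : (PySem.Dict.mk ((((pvCi m).map Prod.fst)).map (fun k => (k, ([] : List String))))).getD kv.1 []
      = [] :=
    PySem.Dict.getD_of_mem_items _ hmm (by rw [he0keys]; exact hndks) []
  simp only [Function.comp_def]
  rw [h1, he0, hgd]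
  simp

-- B's output in normal form
theorem pv_b_eq (m : List (String × List String)) :
    compute_equivalent_integration_mode_py_alt m
      = (pvCi m).map (fun kv =>
          (kv.1, ((pvCi m).filter (fun kv' =>
            PySem.List.sorted kv'.2 (fun x => x) false == PySem.List.sorted kv.2 (fun x => x) false)).map Prod.fst)) := by
  show (pvCi m).map _ = _
  refine List.map_congr_left (fun kv hkv => ?_)
  congr 1
  rw [show List.map (fun kv : String × List String => (kv.1, PySem.Set.ofList (List.filter (fun x => !PySem.Str.isIn "±" x) kv.2))) (PySem.Dict.ofList m).items = pvCi m from rfl]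
  rw [show (pvCi m).foldl (fun (g : PySem.Dict (List String) (List String)) kv =>
        g.modify (PySem.List.sorted kv.2 (fun x => x) false) [] (· ++ [kv.1])) PySem.Dict.empty
      = ((pvCi m).map (fun kv => (PySem.List.sorted kv.2 (fun x => x) false, kv.1))).foldl
          (fun d p => d.modify p.1 [] (· ++ [p.2])) PySem.Dict.empty from
    (List.foldl_map (f := fun kv : String × List String => (PySem.List.sorted kv.2 (fun x => x) false, kv.1))
      (g := fun (d : PySem.Dict (List String) (List String)) (p : List String × String) => d.modify p.1 [] (· ++ [p.2]))).symm]
  rw [PySem.Dict.getD_foldl_modify_append]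
  simp [List.filter_map, Function.comp_def]

-- ===== VERDICT (by name: the statement is the Claim_ definition above) =====
theorem compute_equivalent_integration_mode_py_spec : Claim_equal_compute_equivalent_integration_mode_py := by
  intro m _
  unfold Spec_compute_equivalent_integration_mode_py
  rw [pv_a_eq, pv_b_eq]
  refine List.map_congr_left (fun kv hkv => ?_)
  congr 1
  refine congrArg _ (List.filter_congr (fun kv' hkv' => ?_))
  have hnu : kv.2.Nodup := by
    rcases List.mem_map.mp hkv with ⟨p, _, rfl⟩
    exact PySem.Set.nodup_ofList _
  have hnw : kv'.2.Nodup := by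
    rcases List.mem_map.mp hkv' with ⟨p, _, rfl⟩
    exact PySem.Set.nodup_ofList _
  exact pv_equal_iff_canon kv.2 kv'.2 hnu hnw
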